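-- pv_equiv track=rewrite | github.com/ijakenorton/defect_detection_benchmark | scripts/find_missing_experiments.py | _generate_dataset_groups
-- ===== SOURCE A (Python) =====
-- from typing import Set, Tuple, List, Dict
--
-- def _generate_dataset_groups(datasets: Dict) -> Dict:
--     """Auto-generate dataset groups based on the 'size' field."""
--     groups = {
--         "small": [],
--         "big": [],
--         "all": []
--     }
--
--     for name, config in datasets.items():
--         groups["all"].append(name)
--         size = config.get("size", "small")
--         if size == "small":
--             groups["small"].append(name)
--         elif size == "big":
--             groups["big"].append(name)
--
--     # Sort for consistency
--     for group in groups.values():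
--         group.sort()
--
--     return groups
-- ===== SOURCE B (Python) =====
-- def _generate_dataset_groups(datasets):
--     """Sort the names once, then partition the sorted list by the 'size' field."""
--     ordered = sorted(datasets)
--     return {
--         "small": [n for n in ordered if datasets[n].get("size", "small") == "small"],
--         "big": [n for n in ordered if datasets[n].get("size", "small") == "big"],
--         "all": ordered,
--     }
-- ===== Notes on version B (the rewrite author's own statement) =====
-- stated objective: simpler
-- what changed: B sorts the key list once and partitions the sorted list with two comprehensions, instead of bucketing into three lists in one loop and then sorting each bucket separately.
import Mathlib
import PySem

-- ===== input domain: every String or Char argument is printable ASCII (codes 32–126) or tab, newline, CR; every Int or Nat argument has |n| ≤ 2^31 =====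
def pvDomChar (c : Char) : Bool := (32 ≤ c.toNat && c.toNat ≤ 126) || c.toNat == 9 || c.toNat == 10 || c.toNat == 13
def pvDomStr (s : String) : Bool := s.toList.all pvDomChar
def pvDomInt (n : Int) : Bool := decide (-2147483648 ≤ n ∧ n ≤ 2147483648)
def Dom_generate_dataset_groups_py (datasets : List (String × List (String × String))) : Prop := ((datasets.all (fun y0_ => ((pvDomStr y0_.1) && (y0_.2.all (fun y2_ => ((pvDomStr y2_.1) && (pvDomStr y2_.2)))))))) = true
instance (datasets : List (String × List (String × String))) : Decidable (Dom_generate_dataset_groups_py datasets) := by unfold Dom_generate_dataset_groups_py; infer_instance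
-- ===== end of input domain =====

-- B sorts the name list once and partitions it, instead of bucketing in one pass and sorting each group. Objective: simpler.
-- ===== PORT A =====
-- config.get("size", "small")
def pySizeOf (config : List (String × String)) : String :=
  (PySem.Dict.ofList config).getD "size" "small"

def pvStepA (g : List String × List String × List String) (p : String × List (String × String)) :
    List String × List String × List String :=
  let all := g.2.2 ++ [p.1]
  let size := pySizeOf p.2
  if size = "small" then (g.1 ++ [p.1], g.2.1, all)
  else if size = "big" then (g.1, g.2.1 ++ [p.1], all)
  else (g.1, g.2.1, all)

def generate_dataset_groups_py (datasets : List (String × List (String × String))) : List (String × List String) :=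
  let d := PySem.Dict.ofList datasets
  let g := d.items.foldl pvStepA ([], [], [])
  [("small", PySem.List.sorted g.1 (fun x => x) false),
   ("big", PySem.List.sorted g.2.1 (fun x => x) false),
   ("all", PySem.List.sorted g.2.2 (fun x => x) false)]

-- ===== PORT B =====
def generate_dataset_groups_py_alt (datasets : List (String × List (String × String))) : List (String × List String) :=
  let d := PySem.Dict.ofList datasets
  let ordered := PySem.List.sorted d.keys (fun x => x) false
  [("small", ordered.filter (fun n => pySizeOf (d.getD n []) == "small")),
   ("big", ordered.filter (fun n => pySizeOf (d.getD n []) == "big")),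
   ("all", ordered)]

-- ===== PRECONDITION & SPEC =====
def Spec_generate_dataset_groups_py (datasets : List (String × List (String × String))) (out : List (String × List String)) : Prop := out = generate_dataset_groups_py_alt datasets
instance (datasets : List (String × List (String × String))) (out : List (String × List String)) : Decidable (Spec_generate_dataset_groups_py datasets out) := by unfold Spec_generate_dataset_groups_py; infer_instance

-- ===== CLAIM (what is proved, stated in full; the proofs are below) =====
def Claim_equal_generate_dataset_groups_py : Prop := ∀ (datasets : List (String × List (String × String))), Dom_generate_dataset_groups_py datasets → Spec_generate_dataset_groups_py datasets (generate_dataset_groups_py datasets)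

-- ===== LEMMAS AND PROOFS =====
theorem pvFoldA (items : List (String × List (String × String))) (s b a : List String) :
    items.foldl pvStepA (s, b, a) =
      (s ++ (items.filter (fun p => pySizeOf p.2 == "small")).map (·.1),
       b ++ (items.filter (fun p => pySizeOf p.2 == "big")).map (·.1),
       a ++ items.map (·.1)) := by
  induction items generalizing s b a with
  | nil => simp
  | cons p rest ih =>
    by_cases h1 : pySizeOf p.2 = "small"
    · simp [pvStepA, h1, ih]
    · by_cases h2 : pySizeOf p.2 = "big" <;> simp [pvStepA, h1, h2, ih]

theorem pvItemsFilter (d : PySem.Dict String (List (String × String))) (hnd : d.keys.Nodup)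
    (q : String → Bool) :
    ((d.items.filter (fun p => q (pySizeOf p.2))).map (·.1)) =
      d.keys.filter (fun n => q (pySizeOf (d.getD n []))) := by
  rw [PySem.Dict.items_eq_map_keys d hnd []]
  rw [List.filter_map, List.map_map]
  simp [Function.comp_def]

theorem pvSortedFilter (keys : List String) (hnd : keys.Nodup) (q : String → Bool) :
    PySem.List.sorted (keys.filter q) (fun x => x) false =
      (PySem.List.sorted keys (fun x => x) false).filter q := by
  apply PySem.List.sorted_eq_of_perm_of_pairwise_lt
  · exact (PySem.List.sorted_perm keys (fun x => x) false).filter q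
  · apply List.Pairwise.filter
    have hle := PySem.List.sorted_pairwise keys (fun x => x)
    have hne : (PySem.List.sorted keys (fun x => x) false).Nodup :=
      (PySem.List.sorted_perm keys (fun x => x) false).nodup_iff.mpr hnd
    have := hle.and hne
    exact this.imp (fun h => lt_of_le_of_ne h.1 h.2)

-- ===== VERDICT (by name: the statement is the Claim_ definition above) =====
theorem generate_dataset_groups_py_spec : Claim_equal_generate_dataset_groups_py := by
  intro datasets _
  unfold Spec_generate_dataset_groups_py generate_dataset_groups_py generate_dataset_groups_py_alt
  have hnd := PySem.Dict.nodup_keys_ofList (κ := String) datasets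
  dsimp only
  rw [pvFoldA]
  simp only [List.nil_append]
  rw [pvItemsFilter _ hnd (· == "small"), pvItemsFilter _ hnd (· == "big"),
      pvSortedFilter _ hnd (fun n => pySizeOf ((PySem.Dict.ofList datasets).getD n []) == "small"),
      pvSortedFilter _ hnd (fun n => pySizeOf ((PySem.Dict.ofList datasets).getD n []) == "big")]
  have hk : (PySem.Dict.ofList datasets).items.map (·.1) = (PySem.Dict.ofList datasets).keys := rfl
  rw [hk]
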